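-- pv_equiv track=rewrite | github.com/Quedo999/coding_test_algorithm | # 4.py | solution
-- ===== SOURCE A (Python) =====
-- from collections import deque
--
-- def solution(n, edges):
--     answer = 0
--
--     # dfs 돌리기 원활하도록 그래프 생성
--     graph = [[] for _ in range(n)]
--     for i in edges:
--         graph[i[0]].append(i[1])
--         graph[i[1]].append(i[0])
--
--     def dfs(graph, start):
--         dist = [-1] * n
--         dist[start] = 0
--         q = deque([start])
--         while q:
--             now = q.popleft()
--             for n_node in graph[now]:
--                 if dist[n_node] == -1:
--                     dist[n_node] = dist[now] + 1
--                     q.append(n_node)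
--         return dist
--
--     for i in range(n):
--         d_list = dfs(graph, i)
--         for j in d_list:
--             if j >= 2:
--                 answer += 1
--
--     return answer
-- ===== SOURCE B (Python) =====
-- def solution(n, edges):
--     # Build distinct-neighbour sets (order-preserving via list-backed set semantics).
--     nbrs = [[] for _ in range(n)]
--     for a, b in edges:
--         if b not in nbrs[a]:
--             nbrs[a].append(b)
--         if a not in nbrs[b]:
--             nbrs[b].append(a)
--
--     answer = 0
--     seen = [False] * n
--     for i in range(n):
--         if not seen[i]:
--             # BFS once per connected component, collecting the component list.
--             seen[i] = True
--             comp = [i]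
--             k = 0
--             while k < len(comp):
--                 v = comp[k]
--                 k += 1
--                 for w in nbrs[v]:
--                     if not seen[w]:
--                         seen[w] = True
--                         comp.append(w)
--             size = len(comp)
--             for v in comp:
--                 answer += size - 1 - sum(1 for w in nbrs[v] if w != v)
--     return answer
-- ===== Notes on version B (the rewrite author's own statement) =====
-- stated objective: faster
-- what changed: Instead of running one BFS per node and scanning its distance array for values >= 2, B runs one BFS per connected component and adds compSize - 1 - distinctDegree(v) for each member v, using the identity dist(v,j) >= 2 iff j is reachable, j != v and j is not a neighbour of v.
-- outside the precondition, e.g. on solution(2, [(0, 1), (-2, 1)]): A returns 0, B returns -1; on solution(3, [(-1, -1), (0, 1)]): A returns 0, B returns -1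
import Mathlib
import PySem

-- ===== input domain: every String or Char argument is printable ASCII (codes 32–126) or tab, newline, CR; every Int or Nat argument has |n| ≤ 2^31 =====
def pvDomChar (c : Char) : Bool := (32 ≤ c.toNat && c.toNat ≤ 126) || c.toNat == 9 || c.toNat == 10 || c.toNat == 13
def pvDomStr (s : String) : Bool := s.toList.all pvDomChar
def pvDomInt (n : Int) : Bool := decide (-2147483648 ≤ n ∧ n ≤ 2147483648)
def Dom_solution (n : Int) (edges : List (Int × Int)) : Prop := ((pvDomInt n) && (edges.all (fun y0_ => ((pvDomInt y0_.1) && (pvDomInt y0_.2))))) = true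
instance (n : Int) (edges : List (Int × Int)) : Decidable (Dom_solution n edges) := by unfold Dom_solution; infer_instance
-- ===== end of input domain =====

-- B replaces A's per-node BFS + distance scan by ONE BFS per connected component and the
-- closed formula componentSize - 1 - distinctDegree(v) per member v.

-- ===== PORT A =====
-- graph = [[] for _ in range(n)]; for (a,b) in edges: graph[a].append(b); graph[b].append(a)
-- (the Python list of n lists is represented as a function Int → List Int; exact for the
--  indices 0..n-1, the only ones used under Pre_solution)
-- Python list indexing graph[a] wraps a negative index to a + n; the function-backed list
-- stores nodes under that canonical index (pvIdx), which is exact under Pre_solution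
def pvIdx (n x : Int) : Int := if x < 0 then x + n else x

def pvAdjStep (n : Int) (g : Int → List Int) (e : Int × Int) : Int → List Int :=
  let g1 : Int → List Int := fun x => if x = pvIdx n e.1 then g x ++ [pvIdx n e.2] else g x
  fun x => if x = pvIdx n e.2 then g1 x ++ [pvIdx n e.1] else g1 x

def pvAdj (n : Int) (edges : List (Int × Int)) : Int → List Int :=
  edges.foldl (pvAdjStep n) (fun _ => [])

-- body of 'for n_node in graph[now]: if dist[n_node] == -1: …'
def pvRelaxA (now : Int) (p : List Int × (Int → Int)) (w : Int) : List Int × (Int → Int) :=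
  if p.2 w = -1 then (p.1 ++ [w], fun x => if x = w then p.2 now + 1 else p.2 x) else p

-- the dfs helper's while loop (a BFS); fuel bounds the number of iterations (each pops one
-- node and at most n nodes are ever enqueued, so fuel = n is enough under Pre_solution)
def pvBfsA (G : Int → List Int) : Nat → List Int → (Int → Int) → (Int → Int)
  | 0, _, dist => dist
  | _ + 1, [], dist => dist
  | fuel + 1, now :: q, dist =>
    let s := (G now).foldl (pvRelaxA now) (q, dist)
    pvBfsA G fuel s.1 s.2

def solution (n : Int) (edges : List (Int × Int)) : Int :=
  let graph := pvAdj n edges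
  (PySem.List.pyRange 0 n 1).foldl (fun answer i =>
    let dist := pvBfsA graph n.toNat [i] (fun j => if j = i then 0 else -1)
    (PySem.List.pyRange 0 n 1).foldl (fun a j => if 2 ≤ dist j then a + 1 else a) answer) 0

-- ===== PORT B =====
-- nbrs = [[] for _ in range(n)]; each endpoint appended only if not already present
def pvNbrsStep (n : Int) (g : Int → List Int) (e : Int × Int) : Int → List Int :=
  let g1 : Int → List Int := fun x => if x = pvIdx n e.1 then (if pvIdx n e.2 ∈ g x then g x else g x ++ [pvIdx n e.2]) else g x
  fun x => if x = pvIdx n e.2 then (if pvIdx n e.1 ∈ g1 x then g1 x else g1 x ++ [pvIdx n e.1]) else g1 x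

def pvNbrs (n : Int) (edges : List (Int × Int)) : Int → List Int :=
  edges.foldl (pvNbrsStep n) (fun _ => [])

-- body of 'for w in nbrs[v]: if not seen[w]: …'
def pvRelaxB (p : (Int → Bool) × List Int) (w : Int) : (Int → Bool) × List Int :=
  if p.1 w then p else ((fun x => if x = w then true else p.1 x), p.2 ++ [w])

-- 'while k < len(comp): v = comp[k]; k += 1; …'  (fuel = n bounds the iterations: comp
-- holds distinct nodes of 0..n-1 under Pre_solution)
def pvBfsB (N : Int → List Int) : Nat → Nat → List Int → (Int → Bool) → ((Int → Bool) × List Int)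
  | 0, _, comp, seen => (seen, comp)
  | fuel + 1, k, comp, seen =>
    if h : k < comp.length then
      let s := (N comp[k]).foldl pvRelaxB (seen, comp)
      pvBfsB N fuel (k + 1) s.2 s.1
    else (seen, comp)

-- body of 'for i in range(n): if not seen[i]: …'
def pvOuterStepB (N : Int → List Int) (fuelN : Nat) (st : (Int → Bool) × Int) (i : Int) : (Int → Bool) × Int :=
  if st.1 i then st else
    let s := pvBfsB N fuelN 0 [i] (fun x => if x = i then true else st.1 x)
    let size : Int := s.2.length
    (s.1, s.2.foldl (fun a v => a + (size - 1 - ((N v).countP (fun w => w ≠ v) : Int))) st.2)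

def solution_alt (n : Int) (edges : List (Int × Int)) : Int :=
  let N := pvNbrs n edges
  ((PySem.List.pyRange 0 n 1).foldl (pvOuterStepB N n.toNat) ((fun _ => false), 0)).2

-- ===== PRECONDITION & SPEC =====
-- Pre_solution excludes edges with an endpoint outside [-n, n) (A raises IndexError) and, among
-- the in-range inputs, the negative-index wraparound corners where one node is named by two
-- aliasing labels x and x+n (or by a negative self-loop label): there Python's list wraparound
-- makes the two programs count set members of the same node under different names, an accident
-- of list indexing on which neither value is meaningful.
def Pre_solution (n : Int) (edges : List (Int × Int)) : Prop :=
  (∀ e ∈ edges, -n ≤ e.1 ∧ e.1 < n ∧ -n ≤ e.2 ∧ e.2 < n) ∧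
  (∀ x ∈ edges.flatMap (fun e => [e.1, e.2]), ∀ y ∈ edges.flatMap (fun e => [e.1, e.2]), x + n ≠ y) ∧
  (∀ e ∈ edges, e.1 = e.2 → 0 ≤ e.1)
instance (n : Int) (edges : List (Int × Int)) : Decidable (Pre_solution n edges) := by unfold Pre_solution; infer_instance

def pvWitness_solution : Int × (List (Int × Int)) := (4, [(0, 1), (1, 2)])

def Spec_solution (n : Int) (edges : List (Int × Int)) (out : Int) : Prop := out = solution_alt n edges
instance (n : Int) (edges : List (Int × Int)) (out : Int) : Decidable (Spec_solution n edges out) := by unfold Spec_solution; infer_instance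

-- ===== CLAIM (what is proved, stated in full; the proofs are below) =====
def Claim_equal_solution : Prop := ∀ (n : Int) (edges : List (Int × Int)), Dom_solution n edges → Pre_solution n edges → Spec_solution n edges (solution n edges)

-- ===== LEMMAS AND PROOFS =====

-- the node set 0..n-1, the reachability relation of the (symmetric) graph, the node set of a
-- component, and the value both programs assign to a single node
noncomputable def pvI (n : Int) : Finset Int := Finset.Icc 0 (n - 1)

def pvReach (n : Int) (edges : List (Int × Int)) (i j : Int) : Prop :=
  Relation.ReflTransGen (fun a b => b ∈ pvAdj n edges a) i j

noncomputable def pvRF (n : Int) (edges : List (Int × Int)) (i : Int) : Finset Int :=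
  @Finset.filter _ (fun j => pvReach n edges i j) (fun _ => Classical.propDecidable _) (pvI n)

noncomputable def pvT (n : Int) (edges : List (Int × Int)) (i : Int) : Int :=
  ((pvRF n edges i).card : Int) - 1 - ((pvNbrs n edges i).countP (fun w => w ≠ i) : Int)

noncomputable def pvUnvisA (n : Int) (d : Int → Int) : Finset Int := (pvI n).filter (fun j => d j = -1)
noncomputable def pvUnvisB (n : Int) (seen : Int → Bool) : Finset Int := (pvI n).filter (fun j => seen j = false)

-- ---- adjacency-structure lemmas ----
lemma mem_pvAdjStep (n : Int) (g : Int → List Int) (e : Int × Int) (x y : Int) :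
    y ∈ pvAdjStep n g e x ↔ y ∈ g x ∨ (x = pvIdx n e.1 ∧ y = pvIdx n e.2) ∨ (x = pvIdx n e.2 ∧ y = pvIdx n e.1) := by
  simp only [pvAdjStep]
  split_ifs <;> aesop

lemma mem_pvNbrsStep (n : Int) (g : Int → List Int) (e : Int × Int) (x y : Int) :
    y ∈ pvNbrsStep n g e x ↔ y ∈ g x ∨ (x = pvIdx n e.1 ∧ y = pvIdx n e.2) ∨ (x = pvIdx n e.2 ∧ y = pvIdx n e.1) := by
  simp only [pvNbrsStep]
  split_ifs <;> aesop

lemma mem_pvNbrs_iff_aux (n : Int) (es : List (Int × Int)) :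
    ∀ (g g' : Int → List Int), (∀ x y, y ∈ g x ↔ y ∈ g' x) →
    ∀ x y, y ∈ es.foldl (pvNbrsStep n) g x ↔ y ∈ es.foldl (pvAdjStep n) g' x := by
  intro g g' h
  induction es generalizing g g' with
  | nil => exact h
  | cons e es ih =>
    intro x y
    simp only [List.foldl_cons]
    exact ih _ _ (fun x y => by rw [mem_pvNbrsStep, mem_pvAdjStep, h x y]) x y

lemma mem_pvNbrs_iff (n : Int) (edges : List (Int × Int)) (x y : Int) :
    y ∈ pvNbrs n edges x ↔ y ∈ pvAdj n edges x := by
  exact mem_pvNbrs_iff_aux n edges (fun _ => []) (fun _ => []) (fun _ _ => Iff.rfl) x y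

lemma pvAdj_symm_aux (n : Int) (es : List (Int × Int)) :
    ∀ (g : Int → List Int), (∀ x y, y ∈ g x ↔ x ∈ g y) →
    ∀ x y, y ∈ es.foldl (pvAdjStep n) g x ↔ x ∈ es.foldl (pvAdjStep n) g y := by
  intro g h
  induction es generalizing g with
  | nil => exact h
  | cons e es ih =>
    intro x y
    simp only [List.foldl_cons]
    refine ih _ (fun x y => ?_) x y
    rw [mem_pvAdjStep, mem_pvAdjStep]
    have := h x y
    tauto

lemma pvAdj_symm (n : Int) (edges : List (Int × Int)) (x y : Int) :
    y ∈ pvAdj n edges x ↔ x ∈ pvAdj n edges y := by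
  exact pvAdj_symm_aux n edges (fun _ => []) (fun _ _ => by simp) x y

lemma pvAdj_range_aux (n : Int) (es : List (Int × Int)) (hes : ∀ e ∈ es, -n ≤ e.1 ∧ e.1 < n ∧ -n ≤ e.2 ∧ e.2 < n) :
    ∀ (g : Int → List Int), (∀ x y, y ∈ g x → y ∈ pvI n) →
    ∀ x y, y ∈ es.foldl (pvAdjStep n) g x → y ∈ pvI n := by
  induction es with
  | nil => intro g hg x y h; exact hg x y h
  | cons e es ih =>
    intro g hg x y h
    refine ih (fun e he => hes e (List.mem_cons_of_mem _ he)) _ (fun x y hy => ?_) x y h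
    rw [mem_pvAdjStep] at hy
    have he := hes e (List.mem_cons_self ..)
    rcases hy with hy | ⟨_, rfl⟩ | ⟨_, rfl⟩
    · exact hg x y hy
    · simp only [pvIdx, pvI, Finset.mem_Icc]; split_ifs <;> omega
    · simp only [pvIdx, pvI, Finset.mem_Icc]; split_ifs <;> omega

lemma pvAdj_range (n : Int) (edges : List (Int × Int)) (hpre : Pre_solution n edges)
    (x y : Int) (h : y ∈ pvAdj n edges x) : y ∈ pvI n := by
  exact pvAdj_range_aux n edges hpre.1 (fun _ => []) (by simp) x y h

lemma pvNbrs_nodup_aux (n : Int) (es : List (Int × Int)) :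
    ∀ (g : Int → List Int), (∀ x, (g x).Nodup) → ∀ x, (es.foldl (pvNbrsStep n) g x).Nodup := by
  have hstep2 : ∀ (l : List Int) (a : Int), l.Nodup → a ∉ l → (l ++ [a]).Nodup := by
    intro l a h1 h2; simp [List.nodup_append, h1]; exact fun b hb hba => h2 (hba ▸ hb)
  induction es with
  | nil => intro g hg x; exact hg x
  | cons e es ih =>
    intro g hg x
    simp only [List.foldl_cons]
    refine ih _ (fun x => ?_) x
    simp only [pvNbrsStep]
    split_ifs <;> aesop

lemma pvNbrs_nodup (n : Int) (edges : List (Int × Int)) (x : Int) : (pvNbrs n edges x).Nodup := by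
  exact pvNbrs_nodup_aux n edges (fun _ => []) (fun _ => List.nodup_nil) x

-- ---- reachability lemmas ----
lemma pvReach_symm (n : Int) (edges : List (Int × Int)) {i j : Int} (h : pvReach n edges i j) : pvReach n edges j i := by
  exact Relation.ReflTransGen.symmetric (fun a b hab => (pvAdj_symm n edges a b).mp hab) h

lemma pvReach_range (n : Int) (edges : List (Int × Int)) (hpre : Pre_solution n edges)
    {i j : Int} (hi : i ∈ pvI n) (h : pvReach n edges i j) : j ∈ pvI n := by
  induction h with
  | refl => exact hi
  | tail _ hbc _ => exact pvAdj_range n edges hpre _ _ hbc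

lemma pvReach_seen_closed (n : Int) (edges : List (Int × Int)) (seen : Int → Bool)
    (hcl : ∀ j, seen j = true → ∀ w ∈ pvAdj n edges j, seen w = true)
    {j x : Int} (hj : seen j = true) (h : pvReach n edges j x) : seen x = true := by
  induction h with
  | refl => exact hj
  | tail _ hbc ih => exact hcl _ ih _ hbc

lemma pvRF_congr (n : Int) (edges : List (Int × Int)) {i v : Int} (h : pvReach n edges i v) :
    pvRF n edges v = pvRF n edges i := by
  unfold pvRF
  ext j
  simp only [Finset.mem_filter]
  constructor
  · rintro ⟨hj, hr⟩; exact ⟨hj, Relation.ReflTransGen.trans h hr⟩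
  · rintro ⟨hj, hr⟩; exact ⟨hj, Relation.ReflTransGen.trans (pvReach_symm n edges h) hr⟩

-- ---- shared counting bridge ----
lemma countP_pyRange_eq_card (n : Int) (p : Int → Bool) :
    (PySem.List.pyRange 0 n 1).countP p = ((pvI n).filter (fun j => p j = true)).card := by
  rw [List.countP_eq_length_filter]
  have hnd : ((PySem.List.pyRange 0 n 1).filter p).Nodup :=
    (PySem.List.nodup_pyRange_one 0 n).filter _
  rw [← List.toFinset_card_of_nodup hnd]
  congr 1
  ext j
  simp only [List.mem_toFinset, List.mem_filter, PySem.List.mem_pyRange_one, pvI,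
    Finset.mem_filter, Finset.mem_Icc]
  constructor
  · rintro ⟨⟨h1, h2⟩, h3⟩; exact ⟨⟨h1, by omega⟩, h3⟩
  · rintro ⟨⟨h1, h2⟩, h3⟩; exact ⟨⟨h1, by omega⟩, h3⟩

lemma sum_nodup_toFinset (l : List Int) (hl : l.Nodup) (f : Int → Int) :
    (l.map f).sum = ∑ j ∈ l.toFinset, f j := by
  exact (List.sum_toFinset f hl).symm

lemma card_pvI (n : Int) : (pvI n).card = n.toNat := by
  simp only [pvI, Int.card_Icc]
  congr 1
  omega

lemma pyRange_toFinset (n : Int) : (PySem.List.pyRange 0 n 1).toFinset = pvI n := by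
  ext j
  simp only [List.mem_toFinset, PySem.List.mem_pyRange_one, pvI, Finset.mem_Icc]
  omega

-- ---- A-side BFS lemmas ----
lemma bfsA_fold (n : Int) (l : List Int) (hlr : ∀ w ∈ l, w ∈ pvI n) :
    ∀ (q : List Int) (d : Int → Int) (now c : Int), d now = c → 0 ≤ c →
    ((∀ j, (l.foldl (pvRelaxA now) (q, d)).2 j = if j ∈ l ∧ d j = -1 then c + 1 else d j) ∧
     (∀ j, j ∈ (l.foldl (pvRelaxA now) (q, d)).1 ↔ j ∈ q ∨ (j ∈ l ∧ d j = -1)) ∧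
     ((pvUnvisA n (l.foldl (pvRelaxA now) (q, d)).2).card + (l.foldl (pvRelaxA now) (q, d)).1.length
        = (pvUnvisA n d).card + q.length)) := by
  induction l with
  | nil =>
    intro q d now c hc hc0
    refine ⟨fun j => by simp, fun j => by simp, by simp⟩
  | cons w l ih =>
    intro q d now c hc hc0
    have hlr' : ∀ x ∈ l, x ∈ pvI n := fun x hx => hlr x (List.mem_cons_of_mem _ hx)
    simp only [List.foldl_cons]
    by_cases hw : d w = -1
    · have hnw : now ≠ w := fun h => by rw [h, hw] at hc; omega
      have hstep : pvRelaxA now (q, d) w = (q ++ [w], fun x => if x = w then d now + 1 else d x) := by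
        simp [pvRelaxA, hw]
      rw [hstep]
      have hd1now : (fun x => if x = w then d now + 1 else d x) now = c := by
        simp [if_neg hnw, hc]
      obtain ⟨ihc, ihm, ihcount⟩ := ih hlr' (q ++ [w]) (fun x => if x = w then d now + 1 else d x) now c hd1now hc0
      refine ⟨?_, ?_, ?_⟩
      · intro j
        rw [ihc j]
        by_cases hjw : j = w
        · rw [hjw]
          have hcc : ¬(c + 1 = -1) := by omega
          simp [hc, hw, hcc]
        · simp only [if_neg hjw]
          have hiff : (j ∈ l ∧ d j = -1) ↔ (j ∈ w :: l ∧ d j = -1) := by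
            simp [List.mem_cons, hjw]
          rw [if_congr hiff rfl rfl]
      · intro j
        rw [ihm j]
        by_cases hjw : j = w
        · rw [hjw]
          simp [hw, List.mem_append]
        · simp only [if_neg hjw, List.mem_append, List.mem_cons, List.not_mem_nil, or_false]
          tauto
      · have hU : pvUnvisA n (fun x => if x = w then d now + 1 else d x) = (pvUnvisA n d).erase w := by
          ext x
          simp only [pvUnvisA, Finset.mem_filter, Finset.mem_erase]
          by_cases hxw : x = w
          · rw [hxw]
            constructor
            · rintro ⟨_, h⟩
              rw [if_pos rfl, hc] at h
              exfalso; omega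
            · rintro ⟨h, _⟩; exact absurd rfl h
          · simp only [if_neg hxw]
            tauto
        have hwU : w ∈ pvUnvisA n d := by
          simp only [pvUnvisA, Finset.mem_filter]
          exact ⟨hlr w (List.mem_cons_self ..), hw⟩
        have hcard := Finset.card_erase_add_one hwU
        rw [ihcount, hU, List.length_append]
        simp only [List.length_singleton]
        omega
    · have hstep : pvRelaxA now (q, d) w = (q, d) := by simp [pvRelaxA, hw]
      rw [hstep]
      obtain ⟨ihc, ihm, ihcount⟩ := ih hlr' q d now c hc hc0
      refine ⟨?_, ?_, ihcount⟩
      · intro j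
        rw [ihc j]
        by_cases hjw : j = w
        · rw [hjw]
          rw [if_neg (fun h => hw h.2), if_neg (fun h => hw h.2)]
        · have hiff : (j ∈ l ∧ d j = -1) ↔ (j ∈ w :: l ∧ d j = -1) := by
            simp [List.mem_cons, hjw]
          rw [if_congr hiff rfl rfl]
      · intro j
        rw [ihm j]
        by_cases hjw : j = w
        · rw [hjw]
          simp [hw]
        · have hiff : (j ∈ l ∧ d j = -1) ↔ (j ∈ w :: l ∧ d j = -1) := by
            simp [List.mem_cons, hjw]
          exact or_congr Iff.rfl hiff

lemma bfsA_go (n i : Int) (edges : List (Int × Int))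
    (hGr : ∀ x y, y ∈ pvAdj n edges x → y ∈ pvI n) :
    ∀ (fuel : Nat) (q : List Int) (d : Int → Int),
    (pvUnvisA n d).card + q.length ≤ fuel →
    (∀ j ∈ q, d j ≠ -1) →
    (∀ j, d j ≠ -1 → j ∉ q → ∀ w ∈ pvAdj n edges j, d w ≠ -1) →
    (∀ j, d j ≠ -1 → 0 ≤ d j) →
    (∀ j, d j = 0 → j = i) →
    (∀ j, d j ≠ -1 → pvReach n edges i j) →
    (∀ j, j ≠ i → d j = 1 → j ∈ pvAdj n edges i) →
    (∀ j ∈ pvAdj n edges i, j ≠ i → d j = 1) →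
    ((∀ j, d j ≠ -1 → pvBfsA (pvAdj n edges) fuel q d j = d j) ∧
     (∀ j, pvBfsA (pvAdj n edges) fuel q d j ≠ -1 → ∀ w ∈ pvAdj n edges j, pvBfsA (pvAdj n edges) fuel q d w ≠ -1) ∧
     (∀ j, pvBfsA (pvAdj n edges) fuel q d j ≠ -1 → pvReach n edges i j) ∧
     (∀ j, pvBfsA (pvAdj n edges) fuel q d j = 0 → j = i) ∧
     (∀ j, pvBfsA (pvAdj n edges) fuel q d j ≠ -1 → 0 ≤ pvBfsA (pvAdj n edges) fuel q d j) ∧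
     (∀ j, j ≠ i → pvBfsA (pvAdj n edges) fuel q d j = 1 → j ∈ pvAdj n edges i)) := by
  intro fuel
  induction fuel with
  | zero =>
    intro q d hPhi hqv hclosed hnn h0 hre h1adj hadj1
    have hq : q = [] := by
      have : q.length = 0 := by omega
      exact List.length_eq_zero_iff.mp this
    subst hq
    exact ⟨fun j _ => rfl, fun j hj w hw => hclosed j hj (by simp) w hw, hre, h0, hnn, h1adj⟩
  | succ fuel ih =>
    intro q d hPhi hqv hclosed hnn h0 hre h1adj hadj1
    cases q with
    | nil =>
      exact ⟨fun j _ => rfl, fun j hj w hw => hclosed j hj (by simp) w hw, hre, h0, hnn, h1adj⟩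
    | cons now q' =>
      have hnowv : d now ≠ -1 := hqv now (List.mem_cons_self ..)
      have hnow0 : 0 ≤ d now := hnn now hnowv
      have hGrl : ∀ w ∈ pvAdj n edges now, w ∈ pvI n := fun w hw => hGr now w hw
      obtain ⟨fc, fm, fcount⟩ :=
        bfsA_fold n (pvAdj n edges now) hGrl q' d now (d now) rfl hnow0
      have hred : pvBfsA (pvAdj n edges) (fuel + 1) (now :: q') d =
          pvBfsA (pvAdj n edges) fuel ((pvAdj n edges now).foldl (pvRelaxA now) (q', d)).1
            ((pvAdj n edges now).foldl (pvRelaxA now) (q', d)).2 := rfl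
      rw [hred]
      set s := (pvAdj n edges now).foldl (pvRelaxA now) (q', d) with hs
      have hvis : ∀ j, d j ≠ -1 → s.2 j = d j := by
        intro j hj
        rw [fc j, if_neg (fun h => hj h.2)]
      have hnew : ∀ j, j ∈ pvAdj n edges now → d j = -1 → s.2 j = d now + 1 := by
        intro j h1 h2
        rw [fc j, if_pos ⟨h1, h2⟩]
      have hold : ∀ j, s.2 j ≠ -1 → d j = -1 → (j ∈ pvAdj n edges now ∧ s.2 j = d now + 1) := by
        intro j hj hdj
        by_cases hG : j ∈ pvAdj n edges now
        · exact ⟨hG, hnew j hG hdj⟩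
        · exfalso; apply hj; rw [fc j, if_neg (fun h => hG h.1)]; exact hdj
      obtain ⟨g1, g2, g3, g4, g5, g6⟩ := ih s.1 s.2
        (by rw [fcount]; simp only [List.length_cons] at hPhi; omega)
        (by
          intro j hj
          rcases (fm j).mp hj with h | ⟨h1, h2⟩
          · rw [hvis j (hqv j (List.mem_cons_of_mem _ h))]
            exact hqv j (List.mem_cons_of_mem _ h)
          · rw [hnew j h1 h2]; omega)
        (by
          intro j hj hnotin w hw
          by_cases hdj : d j = -1
          · obtain ⟨hG, _⟩ := hold j hj hdj
            exact absurd ((fm j).mpr (Or.inr ⟨hG, hdj⟩)) hnotin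
          · by_cases hjnow : j = now
            · subst hjnow
              by_cases hdw : d w = -1
              · rw [hnew w hw hdw]; omega
              · rw [hvis w hdw]; exact hdw
            · have hnq : j ∉ now :: q' := by
                intro hmem
                rcases List.mem_cons.mp hmem with h | h
                · exact hjnow h
                · exact hnotin ((fm j).mpr (Or.inl h))
              have hdw := hclosed j hdj hnq w hw
              rw [hvis w hdw]; exact hdw)
        (by
          intro j hj
          by_cases hdj : d j = -1
          · obtain ⟨_, h2⟩ := hold j hj hdj
            rw [h2]; omega
          · rw [hvis j hdj]; exact hnn j hdj)
        (by
          intro j hj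
          by_cases hdj : d j = -1
          · have hjv : s.2 j ≠ -1 := by rw [hj]; omega
            obtain ⟨_, h2⟩ := hold j hjv hdj
            rw [h2] at hj; omega
          · rw [hvis j hdj] at hj; exact h0 j hj)
        (by
          intro j hj
          by_cases hdj : d j = -1
          · obtain ⟨hG, _⟩ := hold j hj hdj
            exact Relation.ReflTransGen.tail (hre now hnowv) hG
          · rw [hvis j hdj] at hj
            exact hre j hdj)
        (by
          intro j hji hj
          by_cases hdj : d j = -1
          · have hjv : s.2 j ≠ -1 := by rw [hj]; omega
            obtain ⟨hG, h2⟩ := hold j hjv hdj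
            rw [h2] at hj
            have hnow_eq : d now = 0 := by omega
            have : now = i := h0 now hnow_eq
            rw [← this]; exact hG
          · rw [hvis j hdj] at hj
            exact h1adj j hji hj)
        (by
          intro j hjG hji
          have hd1 := hadj1 j hjG hji
          rw [hvis j (by rw [hd1]; omega)]
          exact hd1)
      refine ⟨?_, g2, g3, g4, g5, g6⟩
      intro j hdj
      rw [g1 j (by rw [hvis j hdj]; exact hdj), hvis j hdj]

lemma reach_visited (n : Int) (edges : List (Int × Int)) (df : Int → Int) (i : Int)
    (hcl : ∀ j, df j ≠ -1 → ∀ w ∈ pvAdj n edges j, df w ≠ -1) (hi : df i ≠ -1)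
    {j : Int} (h : pvReach n edges i j) : df j ≠ -1 := by
  induction h with
  | refl => exact hi
  | tail _ hbc ih => exact hcl _ ih _ hbc

lemma distA_char (n i : Int) (edges : List (Int × Int)) (hpre : Pre_solution n edges)
    (hi : i ∈ pvI n) (j : Int) :
    (2 ≤ pvBfsA (pvAdj n edges) n.toNat [i] (fun j => if j = i then 0 else -1) j) ↔
      (pvReach n edges i j ∧ j ≠ i ∧ j ∉ pvAdj n edges i) := by
  have hGr : ∀ x y, y ∈ pvAdj n edges x → y ∈ pvI n := fun x y h => pvAdj_range n edges hpre x y h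
  have hiI : 0 ≤ i ∧ i ≤ n - 1 := by simpa [pvI, Finset.mem_Icc] using hi
  obtain ⟨m, hm⟩ : ∃ m, n.toNat = m + 1 := ⟨n.toNat - 1, by omega⟩
  rw [hm]
  have hred : pvBfsA (pvAdj n edges) (m + 1) [i] (fun j => if j = i then 0 else -1) =
      pvBfsA (pvAdj n edges) m
        ((pvAdj n edges i).foldl (pvRelaxA i) ([], fun j => if j = i then 0 else -1)).1
        ((pvAdj n edges i).foldl (pvRelaxA i) ([], fun j => if j = i then 0 else -1)).2 := rfl
  rw [hred]
  set d0 : Int → Int := fun j => if j = i then 0 else -1 with hd0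
  set s := (pvAdj n edges i).foldl (pvRelaxA i) ([], d0) with hs
  have hGrl : ∀ w ∈ pvAdj n edges i, w ∈ pvI n := fun w hw => hGr i w hw
  have hd0i : d0 i = 0 := by simp [hd0]
  obtain ⟨fc, fm, fcount⟩ := bfsA_fold n (pvAdj n edges i) hGrl [] d0 i 0 hd0i le_rfl
  rw [← hs] at fc fm fcount
  simp only [zero_add] at fc
  have hd0ne : ∀ j, j ≠ i → d0 j = -1 := fun j hj => by simp [hd0, hj]
  have hs2i : s.2 i = 0 := by
    rw [fc i, if_neg (by rintro ⟨_, h⟩; rw [hd0i] at h; omega)]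
    exact hd0i
  have hs2new : ∀ j, j ≠ i → j ∈ pvAdj n edges i → s.2 j = 1 := by
    intro j hj hG; rw [fc j, if_pos ⟨hG, hd0ne j hj⟩]
  have hs2un : ∀ j, j ≠ i → j ∉ pvAdj n edges i → s.2 j = -1 := by
    intro j hj hG; rw [fc j, if_neg (fun h => hG h.1)]; exact hd0ne j hj
  have hUd0 : pvUnvisA n d0 = (pvI n).erase i := by
    ext x
    simp only [pvUnvisA, Finset.mem_filter, Finset.mem_erase, hd0]
    by_cases hx : x = i
    · simp [hx]
    · simp [hx]
  have hcard0 : (pvUnvisA n d0).card = m := by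
    have h1 := Finset.card_erase_add_one hi
    have h2 := card_pvI n
    rw [hUd0]
    omega
  obtain ⟨g1, g2, g3, g4, g5, g6⟩ := bfsA_go n i edges hGr m s.1 s.2
    (by rw [fcount, hcard0]; simp)
    (by
      intro j hj
      rcases (fm j).mp hj with h | ⟨h1, h2⟩
      · exact absurd h (List.not_mem_nil)
      · have hji : j ≠ i := by intro he; rw [he, hd0i] at h2; omega
        rw [hs2new j hji h1]; omega)
    (by
      intro j hj hnotin w hw
      by_cases hji : j = i
      · rw [hji] at hw
        by_cases hwi : w = i
        · rw [hwi, hs2i]; omega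
        · rw [hs2new w hwi hw]; omega
      · by_cases hjG : j ∈ pvAdj n edges i
        · exact absurd ((fm j).mpr (Or.inr ⟨hjG, hd0ne j hji⟩)) hnotin
        · exact absurd (hs2un j hji hjG) hj)
    (by
      intro j hj
      by_cases hji : j = i
      · rw [hji, hs2i]
      · by_cases hjG : j ∈ pvAdj n edges i
        · rw [hs2new j hji hjG]; omega
        · exact absurd (hs2un j hji hjG) hj)
    (by
      intro j hj
      by_contra hji
      by_cases hjG : j ∈ pvAdj n edges i
      · rw [hs2new j hji hjG] at hj; omega
      · rw [hs2un j hji hjG] at hj; omega)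
    (by
      intro j hj
      by_cases hji : j = i
      · rw [hji]
        exact Relation.ReflTransGen.refl
      · by_cases hjG : j ∈ pvAdj n edges i
        · exact Relation.ReflTransGen.single hjG
        · exact absurd (hs2un j hji hjG) hj)
    (by
      intro j hji hj
      by_cases hjG : j ∈ pvAdj n edges i
      · exact hjG
      · rw [hs2un j hji hjG] at hj; omega)
    (by intro j hjG hji; exact hs2new j hji hjG)
  have dfi : pvBfsA (pvAdj n edges) m s.1 s.2 i = 0 := by
    rw [g1 i (by rw [hs2i]; omega), hs2i]
  constructor
  · intro h2
    have hne : pvBfsA (pvAdj n edges) m s.1 s.2 j ≠ -1 := by omega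
    have hjne : j ≠ i := by intro he; rw [he, dfi] at h2; omega
    refine ⟨g3 j hne, hjne, ?_⟩
    intro hjG
    have hone : pvBfsA (pvAdj n edges) m s.1 s.2 j = 1 := by
      rw [g1 j (by rw [hs2new j hjne hjG]; omega), hs2new j hjne hjG]
    omega
  · rintro ⟨hr, hji, hjG⟩
    have hvisj : pvBfsA (pvAdj n edges) m s.1 s.2 j ≠ -1 :=
      reach_visited n edges _ i g2 (by rw [dfi]; omega) hr
    have hz : pvBfsA (pvAdj n edges) m s.1 s.2 j ≠ 0 := fun h => hji (g4 j h)
    have h1 : pvBfsA (pvAdj n edges) m s.1 s.2 j ≠ 1 := fun h => hjG (g6 j hji h)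
    have := g5 j hvisj
    omega

lemma countA_eq (n i : Int) (edges : List (Int × Int)) (hpre : Pre_solution n edges)
    (hi : i ∈ pvI n) :
    ((PySem.List.pyRange 0 n 1).countP
        (fun j => decide (2 ≤ pvBfsA (pvAdj n edges) n.toNat [i] (fun j => if j = i then 0 else -1) j)) : Int)
      = pvT n edges i := by
  have hGr : ∀ x y, y ∈ pvAdj n edges x → y ∈ pvI n := fun x y h => pvAdj_range n edges hpre x y h
  rw [countP_pyRange_eq_card]
  have hKsub : (insert i (((pvNbrs n edges i).filter (fun w => w ≠ i)).toFinset)) ⊆ pvRF n edges i := by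
    intro x hx
    rcases Finset.mem_insert.mp hx with rfl | hx
    · simp only [pvRF, Finset.mem_filter]
      exact ⟨hi, Relation.ReflTransGen.refl⟩
    · simp only [List.mem_toFinset, List.mem_filter, decide_eq_true_eq] at hx
      obtain ⟨hxN, hxne⟩ := hx
      have hxG : x ∈ pvAdj n edges i := (mem_pvNbrs_iff n edges i x).mp hxN
      simp only [pvRF, Finset.mem_filter]
      exact ⟨hGr i x hxG, Relation.ReflTransGen.single hxG⟩
  have hset : (pvI n).filter (fun j => decide (2 ≤ pvBfsA (pvAdj n edges) n.toNat [i] (fun j => if j = i then 0 else -1) j) = true)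
      = pvRF n edges i \ (insert i (((pvNbrs n edges i).filter (fun w => w ≠ i)).toFinset)) := by
    ext j
    simp only [Finset.mem_filter, Finset.mem_sdiff, Finset.mem_insert, List.mem_toFinset,
      List.mem_filter, decide_eq_true_eq, pvRF]
    rw [distA_char n i edges hpre hi j]
    constructor
    · rintro ⟨hjI, hr, hji, hjG⟩
      refine ⟨⟨hjI, hr⟩, ?_⟩
      rintro (rfl | ⟨hjN, _⟩)
      · exact hji rfl
      · exact hjG ((mem_pvNbrs_iff n edges i j).mp hjN)
    · rintro ⟨⟨hjI, hr⟩, hK⟩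
      have hji : j ≠ i := fun he => hK (Or.inl he)
      have hjG : j ∉ pvAdj n edges i := fun hG => hK (Or.inr ⟨(mem_pvNbrs_iff n edges i j).mpr hG, hji⟩)
      exact ⟨hjI, hr, hji, hjG⟩
  rw [hset, Finset.card_sdiff, Finset.inter_eq_left.mpr hKsub]
  have hnd : ((pvNbrs n edges i).filter (fun w => w ≠ i)).Nodup := (pvNbrs_nodup n edges i).filter _
  have hiK : i ∉ ((pvNbrs n edges i).filter (fun w => w ≠ i)).toFinset := by simp
  have hcardK : (insert i (((pvNbrs n edges i).filter (fun w => w ≠ i)).toFinset)).card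
      = (pvNbrs n edges i).countP (fun w => w ≠ i) + 1 := by
    rw [Finset.card_insert_of_notMem hiK, List.toFinset_card_of_nodup hnd,
      List.countP_eq_length_filter]
  have hle := Finset.card_le_card hKsub
  rw [hcardK] at hle ⊢
  unfold pvT
  omega

lemma solutionA_eq_sum (n : Int) (edges : List (Int × Int)) (hpre : Pre_solution n edges) :
    solution n edges = ∑ j ∈ pvI n, pvT n edges j := by
  simp only [solution]
  have hinner : ∀ (answer i : Int), i ∈ PySem.List.pyRange 0 n 1 →
      ((PySem.List.pyRange 0 n 1).foldl
        (fun a j => if 2 ≤ pvBfsA (pvAdj n edges) n.toNat [i] (fun j => if j = i then 0 else -1) j then a + 1 else a) answer)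
      = answer + pvT n edges i := by
    intro answer i hmem
    rw [PySem.List.foldl_ite_add_one]
    congr 1
    refine countA_eq n i edges hpre ?_
    have := (PySem.List.mem_pyRange_one).mp hmem
    simp only [pvI, Finset.mem_Icc]
    omega
  have hcong := PySem.List.foldl_congr_mem
    (l := PySem.List.pyRange 0 n 1) (init := (0 : Int))
    (f := fun answer i => (PySem.List.pyRange 0 n 1).foldl
      (fun a j => if 2 ≤ pvBfsA (pvAdj n edges) n.toNat [i] (fun j => if j = i then 0 else -1) j then a + 1 else a) answer)
    (g := fun answer i => answer + pvT n edges i)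
    (fun acc x hx => hinner acc x hx)
  rw [hcong]
  rw [PySem.List.foldl_add]
  rw [sum_nodup_toFinset _ (PySem.List.nodup_pyRange_one 0 n) (fun i => pvT n edges i)]
  rw [pyRange_toFinset]
  simp

-- ---- B-side BFS lemmas ----
lemma bfsB_fold (n : Int) (l : List Int) (hlr : ∀ w ∈ l, w ∈ pvI n) :
    ∀ (comp : List Int) (seen : Int → Bool), (∀ j ∈ comp, seen j = true) → comp.Nodup →
    ((∀ j, (l.foldl pvRelaxB (seen, comp)).1 j = (seen j || decide (j ∈ l))) ∧
     (∀ j, j ∈ (l.foldl pvRelaxB (seen, comp)).2 ↔ j ∈ comp ∨ (j ∈ l ∧ seen j = false)) ∧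
     (comp <+: (l.foldl pvRelaxB (seen, comp)).2) ∧
     ((l.foldl pvRelaxB (seen, comp)).2.Nodup) ∧
     (∀ j ∈ (l.foldl pvRelaxB (seen, comp)).2, (l.foldl pvRelaxB (seen, comp)).1 j = true) ∧
     ((pvUnvisB n (l.foldl pvRelaxB (seen, comp)).1).card + (l.foldl pvRelaxB (seen, comp)).2.length
        = (pvUnvisB n seen).card + comp.length)) := by
  induction l with
  | nil =>
    intro comp seen hcomp hnd
    exact ⟨fun j => by simp, fun j => by simp, List.prefix_rfl, hnd, hcomp, by simp⟩
  | cons w l ih =>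
    intro comp seen hcomp hnd
    have hlr' : ∀ x ∈ l, x ∈ pvI n := fun x hx => hlr x (List.mem_cons_of_mem _ hx)
    simp only [List.foldl_cons]
    by_cases hw : seen w = true
    · have hstep : pvRelaxB (seen, comp) w = (seen, comp) := by simp [pvRelaxB, hw]
      rw [hstep]
      obtain ⟨ic, im, ipre, ind, imk, icount⟩ := ih hlr' comp seen hcomp hnd
      refine ⟨?_, ?_, ipre, ind, imk, icount⟩
      · intro j
        rw [ic j]
        by_cases hjw : j = w
        · rw [hjw, hw]; simp
        · simp [List.mem_cons, hjw]
      · intro j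
        rw [im j]
        by_cases hjw : j = w
        · rw [hjw]
          simp [hw]
        · simp only [List.mem_cons]
          tauto
    · have hwf : seen w = false := by
        cases h : seen w
        · rfl
        · exact absurd h hw
      have hstep : pvRelaxB (seen, comp) w = ((fun x => if x = w then true else seen x), comp ++ [w]) := by
        simp [pvRelaxB, hwf]
      rw [hstep]
      have hwnc : w ∉ comp := fun hwc => by rw [hcomp w hwc] at hwf; cases hwf
      have hcomp1 : ∀ j ∈ comp ++ [w], (fun x => if x = w then true else seen x) j = true := by
        intro j hj
        rcases List.mem_append.mp hj with hj | hj
        · by_cases hjw : j = w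
          · simp [hjw]
          · simp only [if_neg hjw]; exact hcomp j hj
        · simp only [List.mem_singleton] at hj
          simp [hj]
      have hnd1 : (comp ++ [w]).Nodup := by
        simp [List.nodup_append, hnd]
        exact fun b hb hba => hwnc (hba ▸ hb)
      obtain ⟨ic, im, ipre, ind, imk, icount⟩ := ih hlr' (comp ++ [w]) _ hcomp1 hnd1
      refine ⟨?_, ?_, ?_, ind, imk, ?_⟩
      · intro j
        rw [ic j]
        by_cases hjw : j = w
        · rw [hjw]
          simp [hwf]
        · simp only [if_neg hjw]
          simp [List.mem_cons, hjw]
      · intro j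
        rw [im j]
        by_cases hjw : j = w
        · rw [hjw]
          simp [hwf, List.mem_append, hwnc]
        · simp only [if_neg hjw, List.mem_append, List.mem_cons, List.not_mem_nil, or_false]
          tauto
      · exact (List.prefix_append comp [w]).trans ipre
      · have hU : pvUnvisB n (fun x => if x = w then true else seen x) = (pvUnvisB n seen).erase w := by
          ext x
          simp only [pvUnvisB, Finset.mem_filter, Finset.mem_erase]
          by_cases hxw : x = w
          · rw [hxw]
            constructor
            · rintro ⟨_, h⟩
              rw [if_pos rfl] at h
              cases h
            · rintro ⟨h, _⟩; exact absurd rfl h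
          · simp only [if_neg hxw]
            tauto
        have hwU : w ∈ pvUnvisB n seen := by
          simp only [pvUnvisB, Finset.mem_filter]
          exact ⟨hlr w (List.mem_cons_self ..), hwf⟩
        have hcard := Finset.card_erase_add_one hwU
        rw [icount, hU, List.length_append]
        simp only [List.length_singleton]
        omega

lemma bfsB_go (n i : Int) (edges : List (Int × Int)) (seen0 : Int → Bool)
    (hGr : ∀ x y, y ∈ pvNbrs n edges x → y ∈ pvI n) :
    ∀ (fuel k : Nat) (comp : List Int) (seen : Int → Bool),
    (pvUnvisB n seen).card + (comp.length - k) ≤ fuel →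
    comp.Nodup →
    (∀ j ∈ comp, seen j = true) →
    (∀ j, seen j = true ↔ (seen0 j = true ∨ j ∈ comp)) →
    (∀ j ∈ comp, seen0 j = false ∧ pvReach n edges i j) →
    (∀ j ∈ comp.take k, ∀ w ∈ pvNbrs n edges j, seen w = true) →
    ((∀ j, (pvBfsB (pvNbrs n edges) fuel k comp seen).1 j = true ↔
        (seen0 j = true ∨ j ∈ (pvBfsB (pvNbrs n edges) fuel k comp seen).2)) ∧
     (pvBfsB (pvNbrs n edges) fuel k comp seen).2.Nodup ∧
     (∀ j ∈ (pvBfsB (pvNbrs n edges) fuel k comp seen).2, seen0 j = false ∧ pvReach n edges i j) ∧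
     (∀ j ∈ (pvBfsB (pvNbrs n edges) fuel k comp seen).2, ∀ w ∈ pvNbrs n edges j,
        (pvBfsB (pvNbrs n edges) fuel k comp seen).1 w = true) ∧
     (∀ j ∈ comp, j ∈ (pvBfsB (pvNbrs n edges) fuel k comp seen).2)) := by
  intro fuel
  induction fuel with
  | zero =>
    intro k comp seen hPhi hnd hcomp hchar hprops htake
    have htk : comp.take k = comp := List.take_of_length_le (by omega)
    rw [htk] at htake
    exact ⟨fun j => hchar j, hnd, hprops, fun j hj w hw => htake j hj w hw, fun j hj => hj⟩
  | succ fuel ih =>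
    intro k comp seen hPhi hnd hcomp hchar hprops htake
    by_cases hk : k < comp.length
    · have hred : pvBfsB (pvNbrs n edges) (fuel + 1) k comp seen
          = pvBfsB (pvNbrs n edges) fuel (k + 1)
              ((pvNbrs n edges (comp[k]'hk)).foldl pvRelaxB (seen, comp)).2
              ((pvNbrs n edges (comp[k]'hk)).foldl pvRelaxB (seen, comp)).1 := by
        simp only [pvBfsB, dif_pos hk]
      rw [hred]
      have hvmem : comp[k]'hk ∈ comp := List.getElem_mem hk
      have hlrv : ∀ w ∈ pvNbrs n edges (comp[k]'hk), w ∈ pvI n := fun w hw => hGr _ w hw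
      obtain ⟨fc, fm, fpre, fnd, fmk, fcount⟩ :=
        bfsB_fold n (pvNbrs n edges (comp[k]'hk)) hlrv comp seen hcomp hnd
      set s := (pvNbrs n edges (comp[k]'hk)).foldl pvRelaxB (seen, comp) with hs
      have hslen : comp.length ≤ s.2.length := fpre.length_le
      have hchar' : ∀ j, s.1 j = true ↔ (seen0 j = true ∨ j ∈ s.2) := by
        intro j
        rw [fc j]
        simp only [Bool.or_eq_true, decide_eq_true_eq]
        constructor
        · rintro (h | h)
          · rcases (hchar j).mp h with h0 | h0
            · exact Or.inl h0
            · exact Or.inr ((fm j).mpr (Or.inl h0))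
          · cases hsj : seen j
            · exact Or.inr ((fm j).mpr (Or.inr ⟨h, hsj⟩))
            · rcases (hchar j).mp hsj with h0 | h0
              · exact Or.inl h0
              · exact Or.inr ((fm j).mpr (Or.inl h0))
        · rintro (h | h)
          · exact Or.inl ((hchar j).mpr (Or.inl h))
          · rcases (fm j).mp h with h0 | ⟨h0, _⟩
            · exact Or.inl (hcomp j h0)
            · exact Or.inr h0
      have hprops' : ∀ j ∈ s.2, seen0 j = false ∧ pvReach n edges i j := by
        intro j hj
        rcases (fm j).mp hj with h0 | ⟨h0, hsf⟩
        · exact hprops j h0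
        · constructor
          · cases hs0 : seen0 j
            · rfl
            · exfalso
              rw [(hchar j).mpr (Or.inl hs0)] at hsf
              cases hsf
          · exact Relation.ReflTransGen.tail (hprops _ hvmem).2
              ((mem_pvNbrs_iff n edges _ j).mp h0)
      have htk1 : s.2.take (k + 1) = comp.take k ++ [comp[k]'hk] := by
        obtain ⟨t, ht⟩ := fpre
        rw [← ht, List.take_append_of_le_length (by omega), List.take_succ]
        simp [List.getElem?_eq_getElem hk]
      have htake' : ∀ j ∈ s.2.take (k + 1), ∀ w ∈ pvNbrs n edges j, s.1 w = true := by
        intro j hj w hw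
        rw [htk1] at hj
        rcases List.mem_append.mp hj with hj | hj
        · rw [fc w, htake j hj w hw]
          simp
        · simp only [List.mem_singleton] at hj
          rw [hj] at hw
          rw [fc w]
          simp [hw]
      obtain ⟨c1, c2, c3, c4, c5⟩ := ih (k + 1) s.2 s.1
        (by omega)
        fnd fmk hchar' hprops' htake'
      exact ⟨c1, c2, c3, c4, fun j hj => c5 j ((fm j).mpr (Or.inl hj))⟩
    · have hred : pvBfsB (pvNbrs n edges) (fuel + 1) k comp seen = (seen, comp) := by
        simp only [pvBfsB, dif_neg hk]
      rw [hred]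
      have htk : comp.take k = comp := List.take_of_length_le (by omega)
      rw [htk] at htake
      exact ⟨fun j => hchar j, hnd, hprops, fun j hj w hw => htake j hj w hw, fun j hj => hj⟩

lemma compB_char (n i : Int) (edges : List (Int × Int)) (hpre : Pre_solution n edges)
    (hi : i ∈ pvI n) (seen0 : Int → Bool)
    (hsep : ∀ j, pvReach n edges i j → seen0 j = false) :
    ((∀ j, j ∈ (pvBfsB (pvNbrs n edges) n.toNat 0 [i] (fun x => if x = i then true else seen0 x)).2 ↔ pvReach n edges i j) ∧
     (pvBfsB (pvNbrs n edges) n.toNat 0 [i] (fun x => if x = i then true else seen0 x)).2.Nodup ∧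
     (∀ j, (pvBfsB (pvNbrs n edges) n.toNat 0 [i] (fun x => if x = i then true else seen0 x)).1 j = true ↔
        (seen0 j = true ∨ pvReach n edges i j))) := by
  have hGr : ∀ x y, y ∈ pvNbrs n edges x → y ∈ pvI n := fun x y h =>
    pvAdj_range n edges hpre x y ((mem_pvNbrs_iff n edges x y).mp h)
  have hiI : 0 ≤ i ∧ i ≤ n - 1 := by simpa [pvI, Finset.mem_Icc] using hi
  have hs0i : seen0 i = false := hsep i Relation.ReflTransGen.refl
  have hchar0 : ∀ j, (fun x => if x = i then true else seen0 x) j = true ↔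
      (seen0 j = true ∨ j ∈ ([i] : List Int)) := by
    intro j
    by_cases hj : j = i
    · rw [hj]; simp [hs0i]
    · simp [hj]
  have hU : pvUnvisB n (fun x => if x = i then true else seen0 x) = (pvUnvisB n seen0).erase i := by
    ext x
    simp only [pvUnvisB, Finset.mem_filter, Finset.mem_erase]
    by_cases hxw : x = i
    · rw [hxw]
      constructor
      · rintro ⟨_, h⟩
        rw [if_pos rfl] at h
        cases h
      · rintro ⟨h, _⟩; exact absurd rfl h
    · simp only [if_neg hxw]
      tauto
  have hiU : i ∈ pvUnvisB n seen0 := by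
    simp only [pvUnvisB, Finset.mem_filter]
    exact ⟨hi, hs0i⟩
  have hcard := Finset.card_erase_add_one hiU
  have hle : (pvUnvisB n seen0).card ≤ (pvI n).card := Finset.card_filter_le _ _
  have hcI := card_pvI n
  obtain ⟨c1, c2, c3, c4, c5⟩ := bfsB_go n i edges seen0 hGr n.toNat 0 [i]
    (fun x => if x = i then true else seen0 x)
    (by rw [hU]; simp only [List.length_singleton]; omega)
    (List.nodup_singleton i)
    (fun j hj => by
      simp only [List.mem_singleton] at hj
      rw [hj]; simp)
    hchar0
    (fun j hj => by
      simp only [List.mem_singleton] at hj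
      rw [hj]; exact ⟨hs0i, Relation.ReflTransGen.refl⟩)
    (by simp)
  have hcompl : ∀ j, pvReach n edges i j →
      j ∈ (pvBfsB (pvNbrs n edges) n.toNat 0 [i] (fun x => if x = i then true else seen0 x)).2 := by
    intro j hr
    induction hr with
    | refl => exact c5 i (List.mem_singleton_self i)
    | tail h1 h2 ihr =>
      have hw := c4 _ ihr _ ((mem_pvNbrs_iff n edges _ _).mpr h2)
      rcases (c1 _).mp hw with hs | hm
      · have := hsep _ (Relation.ReflTransGen.tail h1 h2)
        rw [this] at hs
        cases hs
      · exact hm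
  refine ⟨?_, c2, ?_⟩
  · intro j
    exact ⟨fun hj => (c3 j hj).2, hcompl j⟩
  · intro j
    rw [c1 j]
    constructor
    · rintro (h | h)
      · exact Or.inl h
      · exact Or.inr (c3 j h).2
    · rintro (h | h)
      · exact Or.inl h
      · exact Or.inr (hcompl j h)

lemma outerB_go (n : Int) (edges : List (Int × Int)) (hpre : Pre_solution n edges) :
    ∀ (rest : List Int) (seen : Int → Bool) (ans : Int),
    (∀ x ∈ rest, x ∈ pvI n) →
    (∀ j, seen j = true → j ∈ pvI n) →
    (∀ j, seen j = true → ∀ w ∈ pvAdj n edges j, seen w = true) →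
    ans = ∑ j ∈ (pvI n).filter (fun j => seen j = true), pvT n edges j →
    ((∀ j, (rest.foldl (pvOuterStepB (pvNbrs n edges) n.toNat) (seen, ans)).1 j = true → j ∈ pvI n) ∧
     (∀ j, (rest.foldl (pvOuterStepB (pvNbrs n edges) n.toNat) (seen, ans)).1 j = true →
        ∀ w ∈ pvAdj n edges j, (rest.foldl (pvOuterStepB (pvNbrs n edges) n.toNat) (seen, ans)).1 w = true) ∧
     (∀ x, (x ∈ rest ∨ seen x = true) → (rest.foldl (pvOuterStepB (pvNbrs n edges) n.toNat) (seen, ans)).1 x = true) ∧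
     ((rest.foldl (pvOuterStepB (pvNbrs n edges) n.toNat) (seen, ans)).2 =
        ∑ j ∈ (pvI n).filter (fun j => (rest.foldl (pvOuterStepB (pvNbrs n edges) n.toNat) (seen, ans)).1 j = true),
          pvT n edges j)) := by
  intro rest
  induction rest with
  | nil =>
    intro seen ans h1 h2 h3 h4
    refine ⟨fun j hj => h2 j hj, fun j hj w hw => h3 j hj w hw, ?_, h4⟩
    intro x hx
    rcases hx with hx | hx
    · exact absurd hx (List.not_mem_nil)
    · exact hx
  | cons i rest ihr =>
    intro seen ans h1 h2 h3 h4
    have hiI : i ∈ pvI n := h1 i (List.mem_cons_self ..)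
    have h1' : ∀ x ∈ rest, x ∈ pvI n := fun x hx => h1 x (List.mem_cons_of_mem _ hx)
    simp only [List.foldl_cons]
    by_cases hsi : seen i = true
    · have hstep : pvOuterStepB (pvNbrs n edges) n.toNat (seen, ans) i = (seen, ans) := by
        simp [pvOuterStepB, hsi]
      simp only [hstep]
      obtain ⟨c1, c2, c3, c4⟩ := ihr seen ans h1' h2 h3 h4
      refine ⟨c1, c2, ?_, c4⟩
      intro x hx
      rcases hx with hx | hx
      · rcases List.mem_cons.mp hx with rfl | hx
        · exact c3 x (Or.inr hsi)
        · exact c3 x (Or.inl hx)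
      · exact c3 x (Or.inr hx)
    · have hsep : ∀ j, pvReach n edges i j → seen j = false := by
        intro j hr
        cases h : seen j
        · rfl
        · exact absurd (pvReach_seen_closed n edges seen h3 h (pvReach_symm n edges hr)) hsi
      obtain ⟨m1, m2, m3⟩ := compB_char n i edges hpre hiI seen hsep
      set s := pvBfsB (pvNbrs n edges) n.toNat 0 [i] (fun x => if x = i then true else seen x) with hs
      have hstep : pvOuterStepB (pvNbrs n edges) n.toNat (seen, ans) i =
          (s.1, s.2.foldl (fun a v => a + ((s.2.length : Int) - 1 -
            ((pvNbrs n edges v).countP (fun w => w ≠ v) : Int))) ans) := by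
        simp only [pvOuterStepB, if_neg hsi]
        rw [← hs]
      simp only [hstep]
      have hreachI : ∀ j, pvReach n edges i j → j ∈ pvI n := fun j hr =>
        pvReach_range n edges hpre hiI hr
      have hfin : s.2.toFinset = pvRF n edges i := by
        ext j
        simp only [List.mem_toFinset, pvRF, Finset.mem_filter]
        constructor
        · intro hj
          exact ⟨hreachI j ((m1 j).mp hj), (m1 j).mp hj⟩
        · rintro ⟨_, hr⟩
          exact (m1 j).mpr hr
      have hlen : (s.2.length : Int) = ((pvRF n edges i).card : Int) := by
        rw [← hfin, List.toFinset_card_of_nodup m2]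
      have hsum2 : s.2.foldl (fun a v => a + ((s.2.length : Int) - 1 -
            ((pvNbrs n edges v).countP (fun w => w ≠ v) : Int))) ans
          = ans + ∑ j ∈ pvRF n edges i, pvT n edges j := by
        rw [PySem.List.foldl_add]
        congr 1
        have hmapc : s.2.map (fun v => (s.2.length : Int) - 1 -
              ((pvNbrs n edges v).countP (fun w => w ≠ v) : Int))
            = s.2.map (fun v => pvT n edges v) := by
          refine List.map_congr_left ?_
          intro v hv
          have hrv : pvReach n edges i v := (m1 v).mp hv
          unfold pvT
          rw [pvRF_congr n edges hrv, hlen]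
        rw [hmapc, sum_nodup_toFinset _ m2 _, hfin]
      simp only [hsum2]
      obtain ⟨c1, c2, c3, c4⟩ := ihr s.1 (ans + ∑ j ∈ pvRF n edges i, pvT n edges j)
        h1'
        (fun j hj => by
          rcases (m3 j).mp hj with h | h
          · exact h2 j h
          · exact hreachI j h)
        (fun j hj w hw => by
          rcases (m3 j).mp hj with h | h
          · exact (m3 w).mpr (Or.inl (h3 j h w hw))
          · exact (m3 w).mpr (Or.inr (Relation.ReflTransGen.tail h hw)))
        (by
          rw [h4]
          have hset : (pvI n).filter (fun j => s.1 j = true)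
              = (pvI n).filter (fun j => seen j = true) ∪ pvRF n edges i := by
            ext j
            simp only [Finset.mem_filter, Finset.mem_union, pvRF]
            constructor
            · rintro ⟨hjI, hj⟩
              rcases (m3 j).mp hj with h | h
              · exact Or.inl ⟨hjI, h⟩
              · exact Or.inr ⟨hjI, h⟩
            · rintro (⟨hjI, hj⟩ | ⟨hjI, hj⟩)
              · exact ⟨hjI, (m3 j).mpr (Or.inl hj)⟩
              · exact ⟨hjI, (m3 j).mpr (Or.inr hj)⟩
          have hdisj : Disjoint ((pvI n).filter (fun j => seen j = true)) (pvRF n edges i) := by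
            rw [Finset.disjoint_left]
            intro a ha hb
            simp only [Finset.mem_filter] at ha
            simp only [pvRF, Finset.mem_filter] at hb
            rw [hsep a hb.2] at ha
            exact absurd ha.2 (by simp)
          rw [hset, Finset.sum_union hdisj])
      refine ⟨c1, c2, ?_, c4⟩
      intro x hx
      rcases hx with hx | hx
      · rcases List.mem_cons.mp hx with rfl | hx
        · exact c3 x (Or.inr ((m3 x).mpr (Or.inr Relation.ReflTransGen.refl)))
        · exact c3 x (Or.inl hx)
      · exact c3 x (Or.inr ((m3 x).mpr (Or.inl hx)))

lemma solutionB_eq_sum (n : Int) (edges : List (Int × Int)) (hpre : Pre_solution n edges) :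
    solution_alt n edges = ∑ j ∈ pvI n, pvT n edges j := by
  simp only [solution_alt]
  obtain ⟨c1, c2, c3, c4⟩ := outerB_go n edges hpre (PySem.List.pyRange 0 n 1)
    (fun _ => false) 0
    (fun x hx => by
      have := (PySem.List.mem_pyRange_one).mp hx
      simp only [pvI, Finset.mem_Icc]
      omega)
    (fun j hj => by cases hj)
    (fun j hj => by cases hj)
    (by simp)
  rw [c4]
  have hall : (pvI n).filter (fun j =>
      ((PySem.List.pyRange 0 n 1).foldl (pvOuterStepB (pvNbrs n edges) n.toNat)
        ((fun _ => false), 0)).1 j = true) = pvI n := by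
    refine Finset.filter_true_of_mem ?_
    intro x hxI
    refine c3 x (Or.inl ?_)
    rw [PySem.List.mem_pyRange_one]
    simp only [pvI, Finset.mem_Icc] at hxI
    omega
  rw [hall]

-- ===== VERDICT (by name: the statement is the Claim_ definition above) =====
theorem solution_spec : Claim_equal_solution := by
  intro n edges _ hpre
  unfold Spec_solution
  rw [solutionA_eq_sum n edges hpre, solutionB_eq_sum n edges hpre]
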